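-- pv_equiv track=rewrite | github.com/karalkal/SoftUni_Python_Advanced | 04_multidimensional_lists/3_exercise_2/6_range_day.py | shot_or_not
-- ===== SOURCE A (Python) =====
-- def shot_or_not(matrix, cur_row, cur_column, direction, hit_targets):
--     if direction == "right":
--         # start checking from next box RIGHT to the end of row
--         for c in range(cur_column + 1, 5):
--             if matrix[cur_row][c] == "x":
--                 hit_targets.append([cur_row, c])  # this list is just for extra checks
--                 matrix[cur_row][c] = "."
--                 break
--     if direction == "left":
--         # start checking from next box LEFT to the start of row
--         for c in range(cur_column - 1, -1, -1):
--             if matrix[cur_row][c] == "x":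
--                 hit_targets.append([cur_row, c])  # this list is just for extra checks
--                 matrix[cur_row][c] = "."
--                 break
--     if direction == "up":
--         # start checking from box ABOVE to the start of column
--         for r in range(cur_row - 1, -1, -1):
--             if matrix[r][cur_column] == "x":
--                 hit_targets.append([r, cur_column])  # this list is just for extra checks
--                 matrix[r][cur_column] = "."
--                 break
--     if direction == "down":
--         # start checking from box BELOW to the end of column
--         for r in range(cur_row + 1, 5):
--             if matrix[r][cur_column] == "x":
--                 hit_targets.append([r, cur_column])  # this list is just for extra checks
--                 matrix[r][cur_column] = "."
--                 break
--     return matrix, hit_targets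
-- ===== SOURCE B (Python) =====
-- # B: instead of walking cell by cell in the shot direction with an early break,
-- # gather ALL target indices on the whole row/column in one pass, then select the
-- # hit as the extremal index on the proper side of the shooter (min beyond it for
-- # right/down, max before it for left/up). Like A, mutates matrix and hit_targets
-- # in place; the equivalence proved is about the returned pair.
-- def shot_or_not(matrix, cur_row, cur_column, direction, hit_targets):
--     horizontal = direction in ("right", "left")
--     if horizontal:
--         pos, cells = cur_column, matrix[cur_row]
--     elif direction in ("up", "down"):
--         pos, cells = cur_row, [matrix[r][cur_column] for r in range(5)]
--     else:
--         return matrix, hit_targets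
--     xs = [i for i in range(5) if cells[i] == "x"]
--     if direction in ("right", "down"):
--         hit = min((i for i in xs if i > pos), default=None)
--     else:
--         hit = max((i for i in xs if i < pos), default=None)
--     if hit is not None:
--         r, c = (cur_row, hit) if horizontal else (hit, cur_column)
--         hit_targets.append([r, c])
--         matrix[r][c] = "."
--     return matrix, hit_targets
-- ===== Notes on version B (the rewrite author's own statement) =====
-- stated objective: alternative
-- what changed: A walks cell by cell in the shot direction with four copied early-break loops; B instead collects all target indices of the whole row/column in one filtering pass and selects the hit as the extremal index on the shooter's side (min beyond it for right/down, max before it for left/up), then marks it.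
-- outside the precondition, e.g. on shot_or_not([['x', 'x']], 5, 4, 'right', [[0, 0]]): A returns ([['x', 'x']], [[0, 0]]), B raises IndexError
import Mathlib
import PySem

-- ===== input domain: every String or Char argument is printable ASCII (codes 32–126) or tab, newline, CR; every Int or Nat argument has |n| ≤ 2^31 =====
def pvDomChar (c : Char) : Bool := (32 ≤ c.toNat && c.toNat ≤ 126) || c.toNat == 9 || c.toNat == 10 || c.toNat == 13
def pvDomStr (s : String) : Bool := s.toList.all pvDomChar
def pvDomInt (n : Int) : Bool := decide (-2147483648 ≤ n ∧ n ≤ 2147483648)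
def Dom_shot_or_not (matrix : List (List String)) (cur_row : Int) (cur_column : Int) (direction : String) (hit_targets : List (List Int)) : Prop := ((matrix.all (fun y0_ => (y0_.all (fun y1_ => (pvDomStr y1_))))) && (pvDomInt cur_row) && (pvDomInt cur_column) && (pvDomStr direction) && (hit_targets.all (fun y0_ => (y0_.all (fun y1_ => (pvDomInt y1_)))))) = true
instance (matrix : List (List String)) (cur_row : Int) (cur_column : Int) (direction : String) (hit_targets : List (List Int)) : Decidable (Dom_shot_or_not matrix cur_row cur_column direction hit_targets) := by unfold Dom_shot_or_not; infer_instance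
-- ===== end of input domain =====

-- B replaces A's four copied directional early-break scans by one pass that collects all
-- target indices of the whole row/column and selects the hit as the extremal index on the
-- shooter's side (min for right/down, max for left/up); both Pythons mutate matrix/hit_targets
-- in place, the equivalence proved here is about the returned pair.


-- shared cell primitives: both Pythons read matrix[r][c] and assign matrix[r][c] = "."
-- (exact for the 0 ≤ r,c in-range accesses Pre_ admits)
def pvCell (m : List (List String)) (r c : Int) : String :=
  (PySem.List.pyGet? ((PySem.List.pyGet? m r).getD []) c).getD ""

def pvMark (m : List (List String)) (r c : Int) : List (List String) :=
  m.set r.toNat (((PySem.List.pyGet? m r).getD []).set c.toNat ".")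

-- ===== PORT A =====
-- 'for c in range(...): if matrix[cur_row][c] == "x": append; assign; break'
def pvScanRowA (m : List (List String)) (hits : List (List Int)) (row : Int) :
    List Int → List (List String) × List (List Int)
  | [] => (m, hits)
  | c :: rest =>
    if pvCell m row c = "x" then (pvMark m row c, hits ++ [[row, c]])
    else pvScanRowA m hits row rest

-- 'for r in range(...): if matrix[r][cur_column] == "x": append; assign; break'
def pvScanColA (m : List (List String)) (hits : List (List Int)) (col : Int) :
    List Int → List (List String) × List (List Int)
  | [] => (m, hits)
  | r :: rest =>
    if pvCell m r col = "x" then (pvMark m r col, hits ++ [[r, col]])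
    else pvScanColA m hits col rest

def shot_or_not (matrix : List (List String)) (cur_row : Int) (cur_column : Int) (direction : String) (hit_targets : List (List Int)) : List (List String) × List (List Int) :=
  let s1 := if direction = "right" then
      pvScanRowA matrix hit_targets cur_row (PySem.List.pyRange (cur_column + 1) 5 1)
    else (matrix, hit_targets)
  let s2 := if direction = "left" then
      pvScanRowA s1.1 s1.2 cur_row (PySem.List.pyRange (cur_column - 1) (-1) (-1))
    else s1
  let s3 := if direction = "up" then
      pvScanColA s2.1 s2.2 cur_column (PySem.List.pyRange (cur_row - 1) (-1) (-1))
    else s2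
  let s4 := if direction = "down" then
      pvScanColA s3.1 s3.2 cur_column (PySem.List.pyRange (cur_row + 1) 5 1)
    else s3
  s4

-- ===== PORT B =====
-- the shared tail of Source B after (pos, cells) is set up: 'xs = [i for i in range(5) if
-- cells[i] == "x"]; hit = min/max(...); if hit is not None: append; assign'
def pvPickB (m : List (List String)) (hits : List (List Int)) (dir : String) (pos : Int)
    (cells : List String) (horizontal : Bool) (cr cc : Int) : List (List String) × List (List Int) :=
  let xs := (PySem.List.pyRange 0 5 1).filter
      (fun i => decide ((PySem.List.pyGet? cells i).getD "" = "x"))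
  let hit := if dir = "right" ∨ dir = "down"
             then PySem.List.min? (xs.filter (fun i => decide (pos < i))) (fun y => y)
             else PySem.List.max? (xs.filter (fun i => decide (i < pos))) (fun y => y)
  match hit with
  | none => (m, hits)
  | some h =>
    let rc : Int × Int := if horizontal then (cr, h) else (h, cc)
    (pvMark m rc.1 rc.2, hits ++ [[rc.1, rc.2]])

def shot_or_not_alt (matrix : List (List String)) (cur_row : Int) (cur_column : Int) (direction : String) (hit_targets : List (List Int)) : List (List String) × List (List Int) :=
  if direction = "right" ∨ direction = "left" then
    pvPickB matrix hit_targets direction cur_column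
      ((PySem.List.pyGet? matrix cur_row).getD []) true cur_row cur_column
  else if direction = "up" ∨ direction = "down" then
    pvPickB matrix hit_targets direction cur_row
      ((PySem.List.pyRange 0 5 1).map
        (fun r => (PySem.List.pyGet? ((PySem.List.pyGet? matrix r).getD []) cur_column).getD ""))
      false cur_row cur_column
  else (matrix, hit_targets)

-- ===== PRECONDITION & SPEC =====
-- The function is the shooting step of a 5x5-board exercise. Pre_ restricts the four real
-- directions to the natural domain: a 5x5 board with the shooter on it. The excluded inputs are
-- the ones where A's raw indexing raises IndexError or wraps around via negative indices
-- (see cite 1), together with off-board corner inputs where both programs happen to agree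
-- (see cite 2). An unrecognised direction is a no-op for both and is always admitted.
def Pre_shot_or_not (matrix : List (List String)) (cur_row : Int) (cur_column : Int) (direction : String) (hit_targets : List (List Int)) : Prop :=
  (direction = "right" ∨ direction = "left" ∨ direction = "up" ∨ direction = "down") →
    (matrix.length = 5 ∧ (∀ row ∈ matrix, row.length = 5) ∧
      0 ≤ cur_row ∧ cur_row < 5 ∧ 0 ≤ cur_column ∧ cur_column < 5)
instance (matrix : List (List String)) (cur_row : Int) (cur_column : Int) (direction : String) (hit_targets : List (List Int)) : Decidable (Pre_shot_or_not matrix cur_row cur_column direction hit_targets) := by unfold Pre_shot_or_not; infer_instance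

def pvWitness_shot_or_not : List (List String) × Int × Int × String × List (List Int) :=
  ([[".", ".", ".", ".", "."], [".", ".", ".", ".", "."], [".", ".", "x", ".", "x"],
    [".", ".", ".", ".", "."], [".", ".", ".", ".", "."]], 2, 2, "right", [])

def Spec_shot_or_not (matrix : List (List String)) (cur_row : Int) (cur_column : Int) (direction : String) (hit_targets : List (List Int)) (out : List (List String) × List (List Int)) : Prop := out = shot_or_not_alt matrix cur_row cur_column direction hit_targets
instance (matrix : List (List String)) (cur_row : Int) (cur_column : Int) (direction : String) (hit_targets : List (List Int)) (out : List (List String) × List (List Int)) : Decidable (Spec_shot_or_not matrix cur_row cur_column direction hit_targets out) := by unfold Spec_shot_or_not; infer_instance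

-- ===== CLAIM (what is proved, stated in full; the proofs are below) =====
def Claim_equal_shot_or_not : Prop := ∀ (matrix : List (List String)) (cur_row : Int) (cur_column : Int) (direction : String) (hit_targets : List (List Int)), Dom_shot_or_not matrix cur_row cur_column direction hit_targets → Pre_shot_or_not matrix cur_row cur_column direction hit_targets → Spec_shot_or_not matrix cur_row cur_column direction hit_targets (shot_or_not matrix cur_row cur_column direction hit_targets)

-- ===== LEMMAS AND PROOFS =====

-- A's break-on-first-match scan returns the head of the filtered scan list
lemma scanRowA_eq (m : List (List String)) (hits : List (List Int)) (row : Int)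
    (l : List Int) :
    pvScanRowA m hits row l =
      match (l.filter (fun c => decide (pvCell m row c = "x"))).head? with
      | none => (m, hits)
      | some c => (pvMark m row c, hits ++ [[row, c]]) := by
  induction l with
  | nil => rfl
  | cons c rest ih =>
    by_cases h : pvCell m row c = "x" <;> simp [pvScanRowA, h, ih]

lemma scanColA_eq (m : List (List String)) (hits : List (List Int)) (col : Int)
    (l : List Int) :
    pvScanColA m hits col l =
      match (l.filter (fun r => decide (pvCell m r col = "x"))).head? with
      | none => (m, hits)
      | some r => (pvMark m r col, hits ++ [[r, col]]) := by
  induction l with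
  | nil => rfl
  | cons r rest ih =>
    by_cases h : pvCell m r col = "x" <;> simp [pvScanColA, h, ih]

-- min of a strictly increasing list is its head
lemma foldl_min_pairwise (x : Int) (t : List Int) (h : (x :: t).Pairwise (· < ·)) :
    t.foldl min x = x := by
  rcases PySem.List.foldl_min_mem t x with he | hm
  · exact he
  · exfalso
    have h1 := (List.pairwise_cons.mp h).1 _ hm
    have h2 := (PySem.List.foldl_min_le t x).1
    omega

lemma min?_pairwise (l : List Int) (h : l.Pairwise (· < ·)) :
    PySem.List.min? l (fun y => y) = l.head? := by
  cases l with
  | nil => exact (PySem.List.min?_eq_none_iff _ _).mpr rfl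
  | cons x t => rw [PySem.List.min?_id_cons, foldl_min_pairwise x t h]; rfl

-- max of a strictly increasing list is its last element
lemma foldl_max_pairwise (t : List Int) : ∀ (x : Int), (x :: t).Pairwise (· < ·) →
    some (t.foldl max x) = (x :: t).getLast? := by
  induction t with
  | nil => intro x _; rfl
  | cons y t' ih =>
    intro x h
    have hxy : x < y := (List.pairwise_cons.mp h).1 _ (List.mem_cons_self ..)
    have h' : (y :: t').Pairwise (· < ·) := (List.pairwise_cons.mp h).2
    have : List.foldl max x (y :: t') = List.foldl max y t' := by
      simp [List.foldl, max_eq_right (le_of_lt hxy)]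
    rw [this, ih y h', List.getLast?_cons_cons]

lemma max?_pairwise (l : List Int) (h : l.Pairwise (· < ·)) :
    PySem.List.max? l (fun y => y) = l.getLast? := by
  cases l with
  | nil => exact (PySem.List.max?_eq_none_iff _ _).mpr rfl
  | cons x t => rw [PySem.List.max?_id_cons, foldl_max_pairwise t x h]

lemma head_filter_reverse (p : Int → Bool) (l : List Int) :
    ((l.reverse).filter p).head? = (l.filter p).getLast? := by
  rw [List.filter_reverse, List.head?_reverse]

-- ===== VERDICT (by name: the statement is the Claim_ definition above) =====
theorem shot_or_not_spec : Claim_equal_shot_or_not := by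
  intro m cr cc dir hits hdom hpre
  unfold Spec_shot_or_not
  by_cases h1 : dir = "right"
  · subst h1
    obtain ⟨-, -, hr0, hr5, hc0, hc5⟩ := hpre (Or.inl rfl)
    have hrange : (PySem.List.pyRange 0 5 1).filter (fun i => decide (cc < i)) =
        PySem.List.pyRange (cc + 1) 5 1 := by interval_cases cc <;> decide
    have hpair : (PySem.List.pyRange (cc + 1) 5 1).Pairwise (· < ·) := by
      interval_cases cc <;> decide
    simp only [shot_or_not, shot_or_not_alt, pvPickB]
    simp
    rw [← List.filter_filter, List.filter_comm, hrange,
      min?_pairwise _ (hpair.filter _), scanRowA_eq]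
    simp only [pvCell]
    rfl
  · by_cases h2 : dir = "left"
    · subst h2
      obtain ⟨-, -, hr0, hr5, hc0, hc5⟩ := hpre (Or.inr (Or.inl rfl))
      have hrange : (PySem.List.pyRange 0 5 1).filter (fun i => decide (i < cc)) =
          PySem.List.pyRange 0 cc 1 := by interval_cases cc <;> decide
      have hrev : PySem.List.pyRange (cc - 1) (-1) (-1) = (PySem.List.pyRange 0 cc 1).reverse := by
        interval_cases cc <;> decide
      have hpair : (PySem.List.pyRange 0 cc 1).Pairwise (· < ·) := by
        interval_cases cc <;> decide
      simp only [shot_or_not, shot_or_not_alt, pvPickB]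
      simp
      rw [← List.filter_filter, List.filter_comm, hrange,
        max?_pairwise _ (hpair.filter _), hrev, scanRowA_eq, head_filter_reverse]
      simp only [pvCell]
      rfl
    · by_cases h3 : dir = "up"
      · subst h3
        obtain ⟨-, -, hr0, hr5, hc0, hc5⟩ := hpre (Or.inr (Or.inr (Or.inl rfl)))
        have hcells : ∀ i ∈ PySem.List.pyRange 0 5 1,
            (decide ((PySem.List.pyGet? ((PySem.List.pyRange 0 5 1).map
                (fun r => (PySem.List.pyGet? ((PySem.List.pyGet? m r).getD []) cc).getD "")) i).getD "" = "x"))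
              = decide (pvCell m i cc = "x") := by
          intro i hi
          have e5 : PySem.List.pyRange 0 5 1 = [0, 1, 2, 3, 4] := by decide
          rw [e5] at hi ⊢
          fin_cases hi <;> simp [pvCell, PySem.List.pyGet?, PySem.List.pyIdx?]
        have hrange : (PySem.List.pyRange 0 5 1).filter (fun i => decide (i < cr)) =
            PySem.List.pyRange 0 cr 1 := by interval_cases cr <;> decide
        have hrev : PySem.List.pyRange (cr - 1) (-1) (-1) = (PySem.List.pyRange 0 cr 1).reverse := by
          interval_cases cr <;> decide
        have hpair : (PySem.List.pyRange 0 cr 1).Pairwise (· < ·) := by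
          interval_cases cr <;> decide
        simp only [shot_or_not, shot_or_not_alt, pvPickB]
        simp
        rw [← List.filter_filter, List.filter_congr hcells, List.filter_comm, hrange,
          max?_pairwise _ (hpair.filter _), hrev, scanColA_eq, head_filter_reverse]
      · by_cases h4 : dir = "down"
        · subst h4
          obtain ⟨-, -, hr0, hr5, hc0, hc5⟩ := hpre (Or.inr (Or.inr (Or.inr rfl)))
          have hcells : ∀ i ∈ PySem.List.pyRange 0 5 1,
              (decide ((PySem.List.pyGet? ((PySem.List.pyRange 0 5 1).map
                  (fun r => (PySem.List.pyGet? ((PySem.List.pyGet? m r).getD []) cc).getD "")) i).getD "" = "x"))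
                = decide (pvCell m i cc = "x") := by
            intro i hi
            have e5 : PySem.List.pyRange 0 5 1 = [0, 1, 2, 3, 4] := by decide
            rw [e5] at hi ⊢
            fin_cases hi <;> simp [pvCell, PySem.List.pyGet?, PySem.List.pyIdx?]
          have hrange : (PySem.List.pyRange 0 5 1).filter (fun i => decide (cr < i)) =
              PySem.List.pyRange (cr + 1) 5 1 := by interval_cases cr <;> decide
          have hpair : (PySem.List.pyRange (cr + 1) 5 1).Pairwise (· < ·) := by
            interval_cases cr <;> decide
          simp only [shot_or_not, shot_or_not_alt, pvPickB]
          simp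
          rw [← List.filter_filter, List.filter_congr hcells, List.filter_comm, hrange,
            min?_pairwise _ (hpair.filter _), scanColA_eq]
        · simp [shot_or_not, shot_or_not_alt, h1, h2, h3, h4]
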